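-- pv_equiv track=rewrite | github.com/haithamabadla/Real-Time-Geofencing-Sentiment-Analysis | stream.py | extract_text_details
-- ===== SOURCE A (Python) =====
-- import string
--
-- def extract_text_details(x):
--     length = len(x) # lenght if each tweet
--     spaces = sum([1 for l in x if l.isspace()]) # how many spaces in each tweet
--     uppers = sum([1 for l in x if l.isupper()]) # how many uppercases in each tweet
--     punctuations  = sum([1 for l in x if l in string.punctuation]) # how many punctuations in each tweet
--     questionsmark = x.count('?') # how many question marks in each tweet
--     explainations = x.count('!') # how many explaination marks in each tweet
--     return length, spaces, uppers, punctuations, questionsmark, explainations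
-- ===== SOURCE B (Python) =====
-- import string
--
-- _PUNCT = frozenset(string.punctuation)
--
-- def extract_text_details(x):
--     # one fused pass over the characters instead of five separate scans
--     spaces = uppers = punctuations = questionsmark = explainations = 0
--     for c in x:
--         if c.isspace():
--             spaces += 1
--         if c.isupper():
--             uppers += 1
--         if c in _PUNCT:
--             punctuations += 1
--         if c == '?':
--             questionsmark += 1
--         if c == '!':
--             explainations += 1
--     return len(x), spaces, uppers, punctuations, questionsmark, explainations
-- ===== Notes on version B (the rewrite author's own statement) =====
-- stated objective: simpler
-- what changed: Replaces five separate scans of the string (three sum-comprehensions and two str.count calls) with one fused loop maintaining five counters.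
import Mathlib
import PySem

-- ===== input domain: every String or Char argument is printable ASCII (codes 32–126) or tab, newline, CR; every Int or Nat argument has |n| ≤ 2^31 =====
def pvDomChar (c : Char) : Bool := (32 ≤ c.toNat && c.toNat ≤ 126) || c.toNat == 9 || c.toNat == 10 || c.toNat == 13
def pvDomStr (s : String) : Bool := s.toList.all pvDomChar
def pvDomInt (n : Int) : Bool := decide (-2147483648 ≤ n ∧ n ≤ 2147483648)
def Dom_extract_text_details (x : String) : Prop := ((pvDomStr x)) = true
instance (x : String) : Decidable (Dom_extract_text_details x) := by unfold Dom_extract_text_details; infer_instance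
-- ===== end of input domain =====

-- B fuses A's five separate scans of the string into one loop over the characters (simpler).

-- string.punctuation
def punctChars : List Char := "!\"#$%&'()*+,-./:;<=>?@[\\]^_`{|}~".toList

-- ===== PORT A =====
def extract_text_details (x : String) : Int × Int × Int × Int × Int × Int :=
  let length : Int := (PySem.Str.len x : Int)
  let spaces : Int := ((x.toList.filter (fun l => PySem.Chars.isspace l)).map (fun _ => (1 : Int))).sum
  let uppers : Int := ((x.toList.filter (fun l => PySem.Chars.isupper l)).map (fun _ => (1 : Int))).sum
  let punctuations : Int := ((x.toList.filter (fun l => PySem.Chars.isIn [l] punctChars)).map (fun _ => (1 : Int))).sum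
  let questionsmark : Int := (PySem.Str.count x "?" : Int)
  let explainations : Int := (PySem.Str.count x "!" : Int)
  (length, spaces, uppers, punctuations, questionsmark, explainations)

-- ===== PORT B =====
def extract_text_details_alt (x : String) : Int × Int × Int × Int × Int × Int :=
  let r : Int × Int × Int × Int × Int :=
    x.toList.foldl
      (fun (acc : Int × Int × Int × Int × Int) c =>
        ((if PySem.Chars.isspace c then acc.1 + 1 else acc.1),
         (if PySem.Chars.isupper c then acc.2.1 + 1 else acc.2.1),
         (if punctChars.contains c then acc.2.2.1 + 1 else acc.2.2.1),
         (if c == '?' then acc.2.2.2.1 + 1 else acc.2.2.2.1),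
         (if c == '!' then acc.2.2.2.2 + 1 else acc.2.2.2.2)))
      (0, 0, 0, 0, 0)
  ((PySem.Str.len x : Int), r.1, r.2.1, r.2.2.1, r.2.2.2.1, r.2.2.2.2)

-- ===== PRECONDITION & SPEC =====
def Spec_extract_text_details (x : String) (out : Int × Int × Int × Int × Int × Int) : Prop := out = extract_text_details_alt x
instance (x : String) (out : Int × Int × Int × Int × Int × Int) : Decidable (Spec_extract_text_details x out) := by unfold Spec_extract_text_details; infer_instance

-- ===== CLAIM (what is proved, stated in full; the proofs are below) =====
def Claim_equal_extract_text_details : Prop := ∀ (x : String), Dom_extract_text_details x → Spec_extract_text_details x (extract_text_details x)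

-- ===== LEMMAS AND PROOFS =====

-- a sum of 1s over a filter is a count
theorem sum_ones_filter (l : List Char) (p : Char → Bool) :
    ((l.filter p).map (fun _ => (1 : Int))).sum = (l.countP p : Int) := by
  induction l with
  | nil => simp
  | cons h t ih =>
    by_cases hp : p h = true <;>
      simp only [List.filter_cons, hp, if_true, if_false, Bool.false_eq_true,
        List.map_cons, List.sum_cons, ih, List.countP_cons] <;> push_cast <;> ring

-- single-character membership test 'l in string.punctuation' is list membership
theorem isIn_singleton (l : Char) (p : List Char) :
    PySem.Chars.isIn [l] p = p.contains l := by
  by_cases h : l ∈ p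
  · have hi : ([l] : List Char) <:+: p := by
      obtain ⟨s, t, rfl⟩ := List.append_of_mem h
      exact ⟨s, t, by simp⟩
    simp [(PySem.Chars.isIn_iff_infix _ _).mpr hi, h]
  · have hi : ¬ ([l] : List Char) <:+: p := fun hi => h (hi.subset (by simp))
    have : PySem.Chars.isIn [l] p ≠ true := fun he => hi ((PySem.Chars.isIn_iff_infix _ _).mp he)
    simp only [Bool.not_eq_true] at this
    simp [this, h]

-- count.go with a single-character needle counts occurrences
theorem count_go_singleton (c : Char) (l : List Char) :
    ∀ (fuel acc : Nat), l.length ≤ fuel →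
      PySem.Chars.count.go [c] fuel l acc = acc + l.count c := by
  induction l with
  | nil => intro fuel acc _; cases fuel <;> simp [PySem.Chars.count.go]
  | cons h t ih =>
    intro fuel acc hf
    cases fuel with
    | zero => simp at hf
    | succ n =>
      have hlen : t.length ≤ n := by simpa using hf
      by_cases hc : h = c
      · subst hc
        have hpre : ([h] : List Char).isPrefixOf (h :: t) = true := by
          simp [List.isPrefixOf]
        simp only [PySem.Chars.count.go, hpre, if_true, List.length_cons,
          List.length_nil, Nat.zero_add, List.drop_succ_cons, List.drop_zero]
        rw [ih n (acc + 1) hlen]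
        simp
        omega
      · have hpre : ([c] : List Char).isPrefixOf (h :: t) = false := by
          simp [List.isPrefixOf]
          exact fun e => hc e.symm
        simp only [PySem.Chars.count.go, hpre, Bool.false_eq_true, if_false]
        rw [ih n acc hlen]
        simp [hc]

-- str.count with a single-character needle counts occurrences
theorem count_singleton (s : List Char) (c : Char) :
    PySem.Chars.count s [c] = s.count c := by
  unfold PySem.Chars.count
  simp [count_go_singleton c s s.length 0 le_rfl]

-- B's fused loop computes the five counts
theorem alt_loop (l : List Char) :
    ∀ (a b c d e : Int),
      l.foldl
        (fun (acc : Int × Int × Int × Int × Int) ch =>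
          ((if PySem.Chars.isspace ch then acc.1 + 1 else acc.1),
           (if PySem.Chars.isupper ch then acc.2.1 + 1 else acc.2.1),
           (if punctChars.contains ch then acc.2.2.1 + 1 else acc.2.2.1),
           (if ch == '?' then acc.2.2.2.1 + 1 else acc.2.2.2.1),
           (if ch == '!' then acc.2.2.2.2 + 1 else acc.2.2.2.2)))
        (a, b, c, d, e)
      = (a + (l.countP (fun ch => PySem.Chars.isspace ch) : Int),
         b + (l.countP (fun ch => PySem.Chars.isupper ch) : Int),
         c + (l.countP (fun ch => punctChars.contains ch) : Int),
         d + (l.count '?' : Int),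
         e + (l.count '!' : Int)) := by
  induction l with
  | nil => intro a b c d e; simp
  | cons h t ih =>
    intro a b c d e
    simp only [List.foldl_cons, ih, List.countP_cons, List.count_cons]
    refine Prod.ext ?_ (Prod.ext ?_ (Prod.ext ?_ (Prod.ext ?_ ?_))) <;>
      simp <;> split_ifs <;> omega

-- ===== VERDICT (by name: the statement is the Claim_ definition above) =====
theorem extract_text_details_spec : Claim_equal_extract_text_details := by
  intro x _
  unfold Spec_extract_text_details extract_text_details extract_text_details_alt
  dsimp only
  rw [alt_loop]
  have hp : x.toList.countP (fun l => PySem.Chars.isIn [l] punctChars)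
          = x.toList.countP (fun ch => punctChars.contains ch) :=
    List.countP_congr (fun ch _ => by simp [isIn_singleton])
  rw [sum_ones_filter, sum_ones_filter, sum_ones_filter, hp]
  simp only [PySem.Str.count_eq, zero_add]
  rw [show ("?" : String).toList = ['?'] from rfl,
      show ("!" : String).toList = ['!'] from rfl,
      count_singleton, count_singleton]
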